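-- pv_equiv track=rewrite | github.com/NathanMar10/Minesweeper | autosweep_circuit.py | get_common_pairs
-- ===== SOURCE A (Python) =====
-- def get_common_pairs(xor_block):
--     """
--     methodology:
--     look @ the first set of the XOR group and find all of the pairs that exist within it -> Eventually I'll make this every group, but thats a bit down the line (and will be spensiveish)
--     check if each of those pairs is in each of the next groups and remove them from the possibilities if they won't work out
--     """
--     pairs = []
--     unopened_squares = xor_block[0]
--     test_pairs = get_pairs(unopened_squares, xor_block[1])
--     for pair in test_pairs:
--         constant = True
--         for i in range(2, len(xor_block)):
--             # Iterates through each combination within the block for each pair of concern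
--             if contains_pair(xor_block[i], pair) != pair[0]:
--                 constant = False
--                 break
--         if constant:
--             pairs.append(pair)
--     return pairs
--
-- def contains_pair(combination, pair):
--     contains = False
--
--     if ((pair[1][1] in combination) == pair[1][0]) and ((pair[2][1] in combination) == pair[2][0]):
--         contains = True
--
--     return contains
--
-- def get_pairs(unopened, first_comb):
--     pairs = []
--     for i in range(len(unopened)):
--         # Iterates for each unopened square. I can make a group with each subsequent square to show the combination
--         for j in range(i + 1, len(unopened)):
--             # Iterates for each unique combination of squares. I then need to catalogue each one is "in" and "out"
--             first_in = (unopened[i] in first_comb)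
--             second_in = (unopened[j] in first_comb)
--             pairs.append((True, (first_in, unopened[i]), (second_in, unopened[j])))
--             pairs.append((False, (not first_in, unopened[i]), (second_in, unopened[j])))
--             pairs.append((False, (first_in, unopened[i]), (not second_in, unopened[j])))
--             pairs.append((False, (not first_in, unopened[i]), (not second_in, unopened[j])))
--     return pairs
-- ===== SOURCE B (Python) =====
-- def get_common_pairs(xor_block):
--     unopened = xor_block[0]
--     first_comb = xor_block[1]
--     rest = xor_block[2:]
--     out = []
--     for i in range(len(unopened)):
--         for j in range(i + 1, len(unopened)):
--             u, v = unopened[i], unopened[j]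
--             a = u in first_comb
--             b = v in first_comb
--             # accumulate the four survival flags in one pass over the remaining groups
--             kT = kF1 = kF2 = kF3 = True
--             for g in rest:
--                 mu = u in g
--                 mv = v in g
--                 kT = kT and (mu == a and mv == b)
--                 kF1 = kF1 and not (mu != a and mv == b)
--                 kF2 = kF2 and not (mu == a and mv != b)
--                 kF3 = kF3 and not (mu != a and mv != b)
--             if kT:
--                 out.append((True, (a, u), (b, v)))
--             if kF1:
--                 out.append((False, (not a, u), (b, v)))
--             if kF2:
--                 out.append((False, (a, u), (not b, v)))
--             if kF3:
--                 out.append((False, (not a, u), (not b, v)))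
--     return out
-- ===== Notes on version B (the rewrite author's own statement) =====
-- stated objective: alternative
-- what changed: B drops the intermediate 4-per-pair candidate list and the per-candidate contains_pair re-scan: for each square pair it makes one pass over groups 2..n accumulating the four survival flags simultaneously and appends survivors directly.
import Mathlib
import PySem

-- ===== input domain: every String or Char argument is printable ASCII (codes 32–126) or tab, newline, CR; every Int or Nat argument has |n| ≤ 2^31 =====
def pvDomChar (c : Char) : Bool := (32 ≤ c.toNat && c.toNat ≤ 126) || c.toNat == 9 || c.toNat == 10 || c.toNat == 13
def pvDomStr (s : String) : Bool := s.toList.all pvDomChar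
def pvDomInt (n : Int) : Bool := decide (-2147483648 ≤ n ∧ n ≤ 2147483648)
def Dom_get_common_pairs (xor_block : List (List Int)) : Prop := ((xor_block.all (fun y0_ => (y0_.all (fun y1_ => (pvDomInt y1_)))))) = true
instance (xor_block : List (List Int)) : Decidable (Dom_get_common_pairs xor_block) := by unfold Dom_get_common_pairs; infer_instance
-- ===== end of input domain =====

-- B replaces A's build-all-candidates-then-filter-by-rescanning decomposition with a per-pair
-- single pass over groups 2..n that accumulates the four survival flags (objective: alternative).

-- ===== PORT A =====
def contains_pair (combination : List Int) (pair : Bool × (Bool × Int) × (Bool × Int)) : Bool :=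
  (combination.contains pair.2.1.2 == pair.2.1.1) && (combination.contains pair.2.2.2 == pair.2.2.1)

def get_pairs (unopened first_comb : List Int) : List (Bool × (Bool × Int) × (Bool × Int)) :=
  (PySem.List.pyRange 0 unopened.length 1).foldl (fun pairs i =>
    (PySem.List.pyRange (i + 1) unopened.length 1).foldl (fun pairs j =>
      let ui := PySem.List.pyGetD unopened i 0
      let uj := PySem.List.pyGetD unopened j 0
      let first_in := first_comb.contains ui
      let second_in := first_comb.contains uj
      pairs ++ [(true, (first_in, ui), (second_in, uj)),
                (false, (!first_in, ui), (second_in, uj)),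
                (false, (first_in, ui), (!second_in, uj)),
                (false, (!first_in, ui), (!second_in, uj))]) pairs) []

-- the Python 'break' is unobservable (once constant is False it can only stay False),
-- so the inner 'for i in range(2, len)' loop is ported as the plain fold over the same range
def get_common_pairs (xor_block : List (List Int)) : List (Bool × (Bool × Int) × (Bool × Int)) :=
  let unopened := PySem.List.pyGetD xor_block 0 []
  let test_pairs := get_pairs unopened (PySem.List.pyGetD xor_block 1 [])
  test_pairs.foldl (fun pairs pair =>
    let constant := (PySem.List.pyRange 2 xor_block.length 1).foldl
      (fun c i => if contains_pair (PySem.List.pyGetD xor_block i []) pair != pair.1 then false else c) true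
    if constant then pairs ++ [pair] else pairs) []

-- ===== PORT B =====
def pairFlags (rest : List (List Int)) (a b : Bool) (u v : Int) : Bool × Bool × Bool × Bool :=
  rest.foldl (fun k g =>
    let mu := g.contains u
    let mv := g.contains v
    (k.1 && (mu == a && mv == b),
     k.2.1 && !(!(mu == a) && mv == b),
     k.2.2.1 && !(mu == a && !(mv == b)),
     k.2.2.2 && !(!(mu == a) && !(mv == b)))) (true, true, true, true)

def get_common_pairs_alt (xor_block : List (List Int)) : List (Bool × (Bool × Int) × (Bool × Int)) :=
  let unopened := PySem.List.pyGetD xor_block 0 []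
  let first_comb := PySem.List.pyGetD xor_block 1 []
  let rest := PySem.List.slice xor_block (some 2) none
  (PySem.List.pyRange 0 unopened.length 1).foldl (fun out i =>
    (PySem.List.pyRange (i + 1) unopened.length 1).foldl (fun out j =>
      let u := PySem.List.pyGetD unopened i 0
      let v := PySem.List.pyGetD unopened j 0
      let a := first_comb.contains u
      let b := first_comb.contains v
      let k := pairFlags rest a b u v
      let o1 := if k.1 then out ++ [(true, (a, u), (b, v))] else out
      let o2 := if k.2.1 then o1 ++ [(false, (!a, u), (b, v))] else o1
      let o3 := if k.2.2.1 then o2 ++ [(false, (a, u), (!b, v))] else o2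
      if k.2.2.2 then o3 ++ [(false, (!a, u), (!b, v))] else o3) out) []

-- ===== PRECONDITION & SPEC =====
-- Python A raises IndexError on xor_block[0] / xor_block[1] when fewer than two groups are given.
def Pre_get_common_pairs (xor_block : List (List Int)) : Prop := 2 ≤ xor_block.length
instance (xor_block : List (List Int)) : Decidable (Pre_get_common_pairs xor_block) := by unfold Pre_get_common_pairs; infer_instance
def pvWitness_get_common_pairs : List (List Int) := [[1, 2, 3], [1, 3]]

def Spec_get_common_pairs (xor_block : List (List Int)) (out : List (Bool × (Bool × Int) × (Bool × Int))) : Prop := out = get_common_pairs_alt xor_block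
instance (xor_block : List (List Int)) (out : List (Bool × (Bool × Int) × (Bool × Int))) : Decidable (Spec_get_common_pairs xor_block out) := by unfold Spec_get_common_pairs; infer_instance

-- ===== CLAIM (what is proved, stated in full; the proofs are below) =====
def Claim_equal_get_common_pairs : Prop := ∀ (xor_block : List (List Int)), Dom_get_common_pairs xor_block → Pre_get_common_pairs xor_block → Spec_get_common_pairs xor_block (get_common_pairs xor_block)

-- ===== LEMMAS AND PROOFS =====

-- the per-candidate "consistent with every later group" test, and the candidate block of one pair
def pAl (l : List (List Int)) (pair : Bool × (Bool × Int) × (Bool × Int)) : Bool :=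
  l.all (fun g => contains_pair g pair == pair.1)

def pA (xb : List (List Int)) : (Bool × (Bool × Int) × (Bool × Int)) → Bool := pAl (xb.drop 2)

def chunkA (unopened first_comb : List Int) (i j : Int) : List (Bool × (Bool × Int) × (Bool × Int)) :=
  let ui := PySem.List.pyGetD unopened i 0
  let uj := PySem.List.pyGetD unopened j 0
  let first_in := first_comb.contains ui
  let second_in := first_comb.contains uj
  [(true, (first_in, ui), (second_in, uj)),
   (false, (!first_in, ui), (second_in, uj)),
   (false, (first_in, ui), (!second_in, uj)),
   (false, (!first_in, ui), (!second_in, uj))]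

theorem pv_double_foldl_flatMap {α : Type} (I : List Int) (J : Int → List Int) (g : Int → Int → List α) :
    I.foldl (fun acc i => (J i).foldl (fun acc j => acc ++ g i j) acc) [] =
      I.flatMap (fun i => (J i).flatMap (fun j => g i j)) := by
  refine Eq.trans (PySem.List.foldl_congr_mem _ _ _ _ (fun acc i _ => PySem.List.foldl_append_eq_flatMap _ _ _)) ?_
  exact (PySem.List.foldl_append_eq_flatMap _ _ _).trans (by simp)

theorem pv_filter_flatMap {α β : Type} (p : β → Bool) (l : List α) (g : α → List β) :
    (l.flatMap g).filter p = l.flatMap (fun x => (g x).filter p) := by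
  induction l with
  | nil => simp
  | cons x xs ih => simp [List.flatMap_cons, List.filter_append, ih]

theorem pv_range_getD_foldl {α β : Type} (xs : List α) (d : α) (f : β → α → β) :
    ∀ (n k : Nat) (init : β), xs.length - k ≤ n →
      (PySem.List.pyRange (k : Int) (xs.length : Int) 1).foldl
        (fun c i => f c (PySem.List.pyGetD xs i d)) init = (xs.drop k).foldl f init := by
  intro n
  induction n with
  | zero =>
    intro k init h
    rw [PySem.List.pyRange_one_eq_nil (by exact_mod_cast Nat.le_of_sub_eq_zero (Nat.le_zero.mp h)),
      List.drop_eq_nil_of_le (by omega)]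
    rfl
  | succ n ih =>
    intro k init h
    by_cases hk : k < xs.length
    · rw [PySem.List.pyRange_one_cons (by exact_mod_cast hk), List.foldl_cons]
      have hget : PySem.List.pyGetD xs (k : Int) d = xs[k] := by
        rw [PySem.List.pyGetD_natCast, List.getD_eq_getElem _ _ hk]
      have hcast : ((k : Int) + 1) = (((k + 1 : Nat)) : Int) := by push_cast; ring
      rw [hget, hcast, ih (k + 1) (f init xs[k]) (by omega),
        List.drop_eq_getElem_cons hk, List.foldl_cons]
    · rw [PySem.List.pyRange_one_eq_nil (by exact_mod_cast Nat.le_of_not_lt hk),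
        List.drop_eq_nil_of_le (by omega)]
      rfl

theorem pv_foldl_if_false_all {α : Type} (q : α → Bool) :
    ∀ (l : List α) (c : Bool),
      l.foldl (fun c g => if q g then false else c) c = (c && l.all (fun g => !(q g))) := by
  intro l
  induction l with
  | nil => intro c; simp
  | cons x xs ih =>
    intro c
    rw [List.foldl_cons, ih]
    by_cases hq : q x = true <;> simp [hq]

theorem pv_beq_not (x a : Bool) : (x == !a) = !(x == a) := by cases x <;> cases a <;> decide

theorem pv_pairFlags_eq (l : List (List Int)) (a b : Bool) (u v : Int) :
    pairFlags l a b u v =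
      (pAl l (true, (a, u), (b, v)),
       pAl l (false, (!a, u), (b, v)),
       pAl l (false, (a, u), (!b, v)),
       pAl l (false, (!a, u), (!b, v))) := by
  have gen : ∀ (m : List (List Int)) (k : Bool × Bool × Bool × Bool),
      m.foldl (fun k g =>
        let mu := g.contains u
        let mv := g.contains v
        (k.1 && (mu == a && mv == b),
         k.2.1 && !(!(mu == a) && mv == b),
         k.2.2.1 && !(mu == a && !(mv == b)),
         k.2.2.2 && !(!(mu == a) && !(mv == b)))) k =
      (k.1 && pAl m (true, (a, u), (b, v)),
       k.2.1 && pAl m (false, (!a, u), (b, v)),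
       k.2.2.1 && pAl m (false, (a, u), (!b, v)),
       k.2.2.2 && pAl m (false, (!a, u), (!b, v))) := by
    intro m
    induction m with
    | nil => intro k; simp [pAl]
    | cons x xs ih =>
      intro k
      rw [List.foldl_cons, ih]
      simp [pAl, contains_pair, pv_beq_not, Bool.and_assoc]
  exact (gen l (true, true, true, true)).trans (by simp)

theorem pv_four_if {α : Type} (out : List α) (f1 f2 f3 f4 : Bool) (c1 c2 c3 c4 : α) :
    (let o1 := if f1 then out ++ [c1] else out
     let o2 := if f2 then o1 ++ [c2] else o1
     let o3 := if f3 then o2 ++ [c3] else o2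
     if f4 then o3 ++ [c4] else o3)
    = out ++ ((if f1 then [c1] else []) ++ ((if f2 then [c2] else []) ++ ((if f3 then [c3] else []) ++ (if f4 then [c4] else [])))) := by
  split_ifs <;> simp

theorem pv_filter_four {α : Type} (p : α → Bool) (c1 c2 c3 c4 : α) :
    List.filter p [c1, c2, c3, c4]
    = ((if p c1 then [c1] else []) ++ ((if p c2 then [c2] else []) ++ ((if p c3 then [c3] else []) ++ (if p c4 then [c4] else [])))) := by
  simp only [List.filter]
  cases p c1 <;> cases p c2 <;> cases p c3 <;> cases p c4 <;> simp

theorem pv_get_pairs_eq (u f : List Int) :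
    get_pairs u f = (PySem.List.pyRange 0 (u.length : Int) 1).flatMap
      (fun i => (PySem.List.pyRange (i + 1) (u.length : Int) 1).flatMap (fun j => chunkA u f i j)) := by
  unfold get_pairs
  exact pv_double_foldl_flatMap (PySem.List.pyRange 0 (u.length : Int) 1)
    (fun i => PySem.List.pyRange (i + 1) (u.length : Int) 1) (chunkA u f)

theorem pv_A_eq (xb : List (List Int)) :
    get_common_pairs xb =
      (get_pairs (PySem.List.pyGetD xb 0 []) (PySem.List.pyGetD xb 1 [])).filter (pA xb) := by
  have hR : ∀ pair : Bool × (Bool × Int) × (Bool × Int),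
      (PySem.List.pyRange 2 (xb.length : Int) 1).foldl
        (fun c i => if contains_pair (PySem.List.pyGetD xb i []) pair != pair.1 then false else c) true
      = pA xb pair := by
    intro pair
    refine Eq.trans (pv_range_getD_foldl xb []
      (fun c g => if contains_pair g pair != pair.1 then false else c) xb.length 2 true (by omega)) ?_
    refine Eq.trans (pv_foldl_if_false_all _ (xb.drop 2) true) ?_
    simp [pA, pAl, bne]
  unfold get_common_pairs
  simp only [hR]
  exact (PySem.List.foldl_append_if_eq_filter _ _ _).trans (by simp [pA])

theorem pv_B_eq (xb : List (List Int)) :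
    get_common_pairs_alt xb =
      (PySem.List.pyRange 0 ((PySem.List.pyGetD xb 0 []).length : Int) 1).flatMap (fun i =>
        (PySem.List.pyRange (i + 1) ((PySem.List.pyGetD xb 0 []).length : Int) 1).flatMap (fun j =>
          (chunkA (PySem.List.pyGetD xb 0 []) (PySem.List.pyGetD xb 1 []) i j).filter (pA xb))) := by
  have hrest : PySem.List.slice xb (some 2) none = xb.drop 2 := by
    simpa using PySem.List.slice_from (xs := xb) (a := 2) (by norm_num)
  have hbody : ∀ (i j : Int) (out : List (Bool × (Bool × Int) × (Bool × Int))),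
      (let u := PySem.List.pyGetD (PySem.List.pyGetD xb 0 []) i 0
       let v := PySem.List.pyGetD (PySem.List.pyGetD xb 0 []) j 0
       let a := (PySem.List.pyGetD xb 1 []).contains u
       let b := (PySem.List.pyGetD xb 1 []).contains v
       let k := pairFlags (PySem.List.slice xb (some 2) none) a b u v
       let o1 := if k.1 then out ++ [(true, (a, u), (b, v))] else out
       let o2 := if k.2.1 then o1 ++ [(false, (!a, u), (b, v))] else o1
       let o3 := if k.2.2.1 then o2 ++ [(false, (a, u), (!b, v))] else o2
       if k.2.2.2 then o3 ++ [(false, (!a, u), (!b, v))] else o3)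
      = out ++ (chunkA (PySem.List.pyGetD xb 0 []) (PySem.List.pyGetD xb 1 []) i j).filter (pA xb) := by
    intro i j out
    simp only [hrest, pv_pairFlags_eq, chunkA]
    rw [pv_filter_four]
    exact pv_four_if out _ _ _ _ _ _ _ _
  unfold get_common_pairs_alt
  refine Eq.trans (b :=
    (PySem.List.pyRange 0 ((PySem.List.pyGetD xb 0 []).length : Int) 1).foldl (fun out i =>
      (PySem.List.pyRange (i + 1) ((PySem.List.pyGetD xb 0 []).length : Int) 1).foldl (fun out j =>
        out ++ (chunkA (PySem.List.pyGetD xb 0 []) (PySem.List.pyGetD xb 1 []) i j).filter (pA xb)) out) []) ?_ ?_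
  · exact PySem.List.foldl_congr_mem _ _ _ _ (fun acc i _ =>
      PySem.List.foldl_congr_mem _ _ _ _ (fun out j _ => hbody i j out))
  · exact pv_double_foldl_flatMap _ _ _

-- ===== VERDICT (by name: the statement is the Claim_ definition above) =====
theorem get_common_pairs_spec : Claim_equal_get_common_pairs := by
  intro xb _ _
  unfold Spec_get_common_pairs
  rw [pv_A_eq, pv_get_pairs_eq, pv_B_eq]
  simp only [pv_filter_flatMap]
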